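-- pv_equiv track=rewrite | github.com/iAmInFirstPlace/goldenratiopatterns | founds.py | find_first_runs
-- ===== SOURCE A (Python) =====
-- def find_first_runs(phi_str: str, max_n: int = 9) -> dict:
--     """
--     Given phi_str (including '1.' prefix), find the first contiguous run of length n
--     for n=2..max_n. Non‐digit breaks a run. Returns {n: (sequence, position)}.
--     """
--     first_runs = {}
--     L = len(phi_str)
--
--     for n in range(2, max_n + 1):
--         seq = "N/A"
--         pos = None
--         run_char = None
--         run_len = 0
--
--         for i, ch in enumerate(phi_str):
--             if not ch.isdigit():
--                 run_char = None
--                 run_len = 0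
--                 continue
--
--             if ch == run_char:
--                 run_len += 1
--             else:
--                 run_char = ch
--                 run_len = 1
--
--             if run_len == n:
--                 seq = run_char * n
--                 # Start position = (i+1) - (n - 1)
--                 pos = (i + 1) - (n - 1)
--                 break
--
--         first_runs[n] = (seq, pos)
--
--     return first_runs
-- ===== SOURCE B (Python) =====
-- def find_first_runs(phi_str: str, max_n: int = 9) -> dict:
--     """
--     Run-length encode the digit runs of phi_str in one pass, then fill the
--     answers for n = 2..max_n in a single sweep over the runs: since the set
--     of already-answered n is always a prefix 2..k, each run of length m
--     answers exactly the still-open n up to min(m, max_n).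
--     O(L + max_n) instead of one scan of phi_str per n.
--     """
--     runs = []  # (char, start_index_0based, length)
--     i, L = 0, len(phi_str)
--     while i < L:
--         ch = phi_str[i]
--         if not ch.isdigit():
--             i += 1
--             continue
--         j = i + 1
--         while j < L and phi_str[j] == ch:
--             j += 1
--         runs.append((ch, i, j - i))
--         i = j
--     out = {}
--     n = 2
--     for ch, s, m in runs:
--         while n <= m and n <= max_n:
--             out[n] = (ch * n, s + 1)
--             n += 1
--     while n <= max_n:
--         out[n] = ("N/A", None)
--         n += 1
--     return out
-- ===== Notes on version B (the rewrite author's own statement) =====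
-- stated objective: faster
-- what changed: A rescans the whole string once per n (for each n in 2..max_n it re-runs the run-tracking loop); B run-length-encodes the digit runs in one pass and then fills the answers for n = 2..max_n in a single sweep over the runs, answering each n exactly once since the answered n always form a prefix.
import Mathlib
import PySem

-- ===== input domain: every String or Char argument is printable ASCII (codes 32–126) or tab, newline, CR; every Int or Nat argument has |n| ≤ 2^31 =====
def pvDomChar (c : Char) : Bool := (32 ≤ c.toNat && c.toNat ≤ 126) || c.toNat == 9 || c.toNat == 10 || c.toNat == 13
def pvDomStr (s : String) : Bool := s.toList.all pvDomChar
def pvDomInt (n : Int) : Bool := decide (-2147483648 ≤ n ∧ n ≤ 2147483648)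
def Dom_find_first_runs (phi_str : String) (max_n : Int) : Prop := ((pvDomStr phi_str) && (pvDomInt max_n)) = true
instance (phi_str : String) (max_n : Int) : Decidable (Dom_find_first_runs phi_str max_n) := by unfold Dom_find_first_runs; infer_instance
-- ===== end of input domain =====

-- B replaces A's per-n rescans of phi_str by one run-length-encoding pass plus one sweep
-- over the runs that answers each n once (objective: faster, O(L + max_n) vs O(L·max_n)).

-- ===== PORT A =====
-- run_char * n  (Python string repetition)
def pvRepChar (c : Char) (n : Int) : String := String.ofList (List.replicate n.toNat c)

-- A's inner 'for i, ch in enumerate(phi_str)' loop for one n, with its break;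
-- at the break run_char = ch, so 'run_char * n' is 'pvRepChar ch n'.
def pvScanA (n : Int) : List (Int × Char) → Option Char → Int → String × Option Int
  | [], _, _ => ("N/A", none)
  | (i, ch) :: rest, run_char, run_len =>
    if ¬ (PySem.Chars.isdigit ch) then pvScanA n rest none 0
    else
      let run_char' : Option Char := if some ch = run_char then run_char else some ch
      let run_len' : Int := if some ch = run_char then run_len + 1 else 1
      if run_len' = n then (pvRepChar ch n, some ((i + 1) - (n - 1)))
      else pvScanA n rest run_char' run_len'

def find_first_runs (phi_str : String) (max_n : Int) : List (Int × String × Option Int) :=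
  ((PySem.List.pyRange 2 (max_n + 1) 1).foldl
    (fun d n => d.insert n (pvScanA n (PySem.List.enumerate phi_str.toList 0) none 0))
    (PySem.Dict.empty : PySem.Dict Int (String × Option Int))).items

-- ===== PORT B =====
-- length of the inner 'while j < L and phi_str[j] == ch' advance
def pvLead (c : Char) : List Char → Nat
  | [] => 0
  | x :: xs => if x = c then pvLead c xs + 1 else 0

-- B's first pass: run-length encoding of the digit runs, as (char, start, length)
def pvRuns : List Char → Int → List (Char × Int × Int)
  | [], _ => []
  | ch :: rest, i =>
    if ¬ (PySem.Chars.isdigit ch) then pvRuns rest (i + 1)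
    else
      (ch, i, (pvLead ch rest : Int) + 1) ::
        pvRuns (rest.drop (pvLead ch rest)) (i + (pvLead ch rest : Int) + 1)
  termination_by l _ => l.length
  decreasing_by
  · simp
  · simp only [List.length_cons, List.length_drop]; omega

-- B's second pass: each run answers the still-open n up to min(m, max_n); the
-- trailing still-open n become "N/A" (the base case).
def pvFill (mx : Int) : List (Char × Int × Int) → Int → List (Int × String × Option Int)
  | [], n => (PySem.List.pyRange n (mx + 1) 1).map (fun q => (q, ("N/A", (none : Option Int))))
  | (ch, s, m) :: rs, n =>
      (PySem.List.pyRange n (min m mx + 1) 1).map (fun q => (q, (pvRepChar ch q, some (s + 1))))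
        ++ pvFill mx rs (max n (min m mx + 1))

def find_first_runs_alt (phi_str : String) (max_n : Int) : List (Int × String × Option Int) :=
  pvFill max_n (pvRuns phi_str.toList 0) 2

-- ===== PRECONDITION & SPEC =====
def Spec_find_first_runs (phi_str : String) (max_n : Int) (out : List (Int × String × Option Int)) : Prop := out = find_first_runs_alt phi_str max_n
instance (phi_str : String) (max_n : Int) (out : List (Int × String × Option Int)) : Decidable (Spec_find_first_runs phi_str max_n out) := by unfold Spec_find_first_runs; infer_instance

-- ===== CLAIM (what is proved, stated in full; the proofs are below) =====
def Claim_equal_find_first_runs : Prop := ∀ (phi_str : String) (max_n : Int), Dom_find_first_runs phi_str max_n → Spec_find_first_runs phi_str max_n (find_first_runs phi_str max_n)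

-- ===== LEMMAS AND PROOFS =====

-- the common value both programs compute for key q: first run of length ≥ q
def pvG (q : Int) (rs : List (Char × Int × Int)) : String × Option Int :=
  match rs.find? (fun r => decide (q ≤ r.2.2)) with
  | some r => (pvRepChar r.1 q, some (r.2.1 + 1))
  | none => ("N/A", none)

lemma pvFill_eq (mx : Int) :
    ∀ (rs : List (Char × Int × Int)) (n : Int),
      pvFill mx rs n = (PySem.List.pyRange n (mx + 1) 1).map (fun q => (q, pvG q rs)) := by
  intro rs
  induction rs with
  | nil => intro n; simp [pvFill, pvG]
  | cons r rs ih =>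
    obtain ⟨ch, s, m⟩ := r
    intro n
    by_cases hn : n ≤ min m mx + 1
    · rw [pvFill, PySem.List.pyRange_one_append n (min m mx + 1) (mx + 1) hn (by omega),
        List.map_append]
      have hmax : max n (min m mx + 1) = min m mx + 1 := by omega
      rw [hmax, ih]
      congr 1
      · apply List.map_congr_left
        intro q hq
        rw [PySem.List.mem_pyRange_one] at hq
        have hqm : q ≤ m := by omega
        simp [pvG, List.find?, hqm]
      · apply List.map_congr_left
        intro q hq
        rw [PySem.List.mem_pyRange_one] at hq
        have hqm : ¬ (q ≤ m) := by omega
        simp [pvG, List.find?, hqm]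
    · rw [pvFill, PySem.List.pyRange_one_eq_nil (by omega : min m mx + 1 ≤ n)]
      have hmax : max n (min m mx + 1) = n := by omega
      rw [hmax, ih]
      simp only [List.map_nil, List.nil_append]
      apply List.map_congr_left
      intro q hq
      rw [PySem.List.mem_pyRange_one] at hq
      have hqm : ¬ (q ≤ m) := by omega
      simp [pvG, List.find?, hqm]

-- A's scan, once inside a run of ch with run_len = t: it breaks iff the run still
-- holds n - t more copies of ch, else it continues fresh past the run.
lemma pvScanA_inrun (n : Int) (ch : Char) (hch : PySem.Chars.isdigit ch = true) :
    ∀ (r : List Char) (t i : Int), 1 ≤ t → t < n →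
      pvScanA n (PySem.List.enumerate r i) (some ch) t =
        if n ≤ t + (pvLead ch r : Int)
        then (pvRepChar ch n, some (i - t + 1))
        else pvScanA n (PySem.List.enumerate (r.drop (pvLead ch r)) (i + (pvLead ch r : Int))) none 0 := by
  intro r
  induction r with
  | nil =>
    intro t i ht htn
    simp [pvLead, pvScanA, PySem.List.enumerate_nil, show ¬ (n ≤ t) by omega]
  | cons c' r' ih =>
    intro t i ht htn
    by_cases hc : c' = ch
    · subst hc
      rw [PySem.List.enumerate_cons, pvScanA]
      simp only [hch, not_true_eq_false, if_false, if_true]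
      by_cases hbreak : t + 1 = n
      · have hcond : n ≤ t + ((pvLead c' (c' :: r') : Nat) : Int) := by
          simp [pvLead]; omega
        rw [if_pos hbreak, if_pos hcond]
        simp only [Prod.mk.injEq, Option.some.injEq, true_and]
        omega
      · rw [if_neg hbreak, ih (t + 1) (i + 1) (by omega) (by omega)]
        have hlead : ((pvLead c' (c' :: r') : Nat) : Int) = (pvLead c' r' : Int) + 1 := by
          simp [pvLead]
        have hdrop : (c' :: r').drop (pvLead c' (c' :: r')) = r'.drop (pvLead c' r') := by
          simp [pvLead]
        rw [hlead, hdrop]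
        by_cases hcond : n ≤ t + 1 + (pvLead c' r' : Int)
        · rw [if_pos hcond, if_pos (by omega : n ≤ t + ((pvLead c' r' : Int) + 1))]
          simp only [Prod.mk.injEq, Option.some.injEq, true_and]
          omega
        · rw [if_neg hcond, if_neg (by omega : ¬ n ≤ t + ((pvLead c' r' : Int) + 1)),
            show i + 1 + (pvLead c' r' : Int) = i + ((pvLead c' r' : Int) + 1) by ring]
    · have hlead : pvLead ch (c' :: r') = 0 := by simp [pvLead, hc]
      rw [if_neg (by simp [hlead]; omega), hlead]
      simp only [List.drop_zero, Nat.cast_zero, add_zero]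
      rw [PySem.List.enumerate_cons, pvScanA, pvScanA]
      by_cases hd : PySem.Chars.isdigit c'
      · simp only [hd, not_true_eq_false, if_false]
        have h1 : (some c' = some ch) = False := by simp [hc]
        have h2 : (some c' = (none : Option Char)) = False := by simp
        simp [h1, h2]
      · simp [hd]

-- A's fresh scan equals the first-run-of-length-≥-n lookup in B's run list.
lemma pvScanA_eq_G (n : Int) (hn : 2 ≤ n) :
    ∀ (l : List Char) (i : Int),
      pvScanA n (PySem.List.enumerate l i) none 0 = pvG n (pvRuns l i) := by
  suffices h : ∀ (N : Nat) (l : List Char), l.length ≤ N → ∀ (i : Int),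
      pvScanA n (PySem.List.enumerate l i) none 0 = pvG n (pvRuns l i) by
    exact fun l i => h l.length l le_rfl i
  intro N
  induction N with
  | zero =>
    intro l hl i
    rw [List.length_eq_zero_iff.mp (Nat.le_zero.mp hl)]
    simp [pvScanA, pvRuns, pvG, PySem.List.enumerate_nil]
  | succ N ihN =>
    intro l hl i
    match l with
    | [] => simp [pvScanA, pvRuns, pvG, PySem.List.enumerate_nil]
    | ch :: rest =>
      by_cases hd : PySem.Chars.isdigit ch
      · rw [PySem.List.enumerate_cons, pvScanA, pvRuns]
        simp only [hd, not_true_eq_false, if_false]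
        have h2 : (some ch = (none : Option Char)) = False := by simp
        simp only [h2, if_false]
        rw [if_neg (by omega : ¬ (1 : Int) = n)]
        rw [pvScanA_inrun n ch hd rest 1 (i + 1) le_rfl (by omega)]
        have hrec := ihN (rest.drop (pvLead ch rest))
          (by simp only [List.length_cons] at hl; simp only [List.length_drop]; omega)
          (i + 1 + (pvLead ch rest : Int))
        by_cases hcond : n ≤ 1 + (pvLead ch rest : Int)
        · rw [if_pos (by omega : n ≤ (1:Int) + (pvLead ch rest : Int))]
          have : pvG n ((ch, i, (pvLead ch rest : Int) + 1) :: pvRuns (rest.drop (pvLead ch rest)) (i + (pvLead ch rest : Int) + 1))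
              = (pvRepChar ch n, some (i + 1)) := by
            simp [pvG, List.find?, show n ≤ (pvLead ch rest : Int) + 1 by omega]
          rw [this]
          simp only [Prod.mk.injEq, Option.some.injEq, true_and]
          omega
        · rw [if_neg (by omega : ¬ n ≤ (1:Int) + (pvLead ch rest : Int))]
          have : pvG n ((ch, i, (pvLead ch rest : Int) + 1) :: pvRuns (rest.drop (pvLead ch rest)) (i + (pvLead ch rest : Int) + 1))
              = pvG n (pvRuns (rest.drop (pvLead ch rest)) (i + (pvLead ch rest : Int) + 1)) := by
            simp [pvG, List.find?, show ¬ n ≤ (pvLead ch rest : Int) + 1 by omega]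
          rw [this, show i + 1 + (pvLead ch rest : Int) = i + (pvLead ch rest : Int) + 1 by ring] at *
          exact hrec
      · rw [PySem.List.enumerate_cons, pvScanA, pvRuns]
        simp only [hd]
        exact ihN rest (by simp only [List.length_cons] at hl; omega) (i + 1)

-- ===== VERDICT (by name: the statement is the Claim_ definition above) =====
theorem find_first_runs_spec : Claim_equal_find_first_runs := by
  intro phi_str max_n _
  unfold Spec_find_first_runs find_first_runs find_first_runs_alt
  rw [PySem.Dict.items_foldl_insert_fresh (PySem.List.pyRange 2 (max_n + 1) 1)
      (fun a => a) (fun a => pvScanA a (PySem.List.enumerate phi_str.toList 0) none 0)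
      PySem.Dict.empty (by intro a _; rfl)
      (by simpa using PySem.List.nodup_pyRange_one 2 (max_n + 1))]
  rw [pvFill_eq]
  apply List.map_congr_left
  intro q hq
  rw [PySem.List.mem_pyRange_one] at hq
  rw [pvScanA_eq_G q (by omega) phi_str.toList 0]
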